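-- pv_equiv track=rewrite | github.com/kevin-ch-day/ScytaleDroid | scytaledroid/StaticAnalysis/detectors/integrity.py | _infer_config_category
-- ===== SOURCE A (Python) =====
-- from typing import Iterable, Optional, Sequence
--
-- def _infer_config_category(split_name: str) -> Optional[str]:
--     label = split_name.split(".", 1)[-1].lower()
--     tokens = {token.replace("-", "_") for token in label.split(".")}
--     abi_tokens = {
--         "armeabi",
--         "armeabi_v7a",
--         "arm64_v8a",
--         "x86",
--         "x86_64",
--         "mips",
--     }
--     density_tokens = {
--         "ldpi",
--         "mdpi",
--         "hdpi",
--         "xhdpi",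
--         "xxhdpi",
--         "xxxhdpi",
--         "nodpi",
--         "tvdpi",
--     }
--
--     if tokens & abi_tokens:
--         return "abi"
--     if tokens & density_tokens:
--         return "density"
--     if any(token.isalpha() and len(token) <= 3 for token in tokens):
--         return "locale"
--     if any("-r" in token for token in tokens):
--         return "locale"
--     return "other"
-- ===== SOURCE B (Python) =====
-- _ABI = {"armeabi", "armeabi_v7a", "arm64_v8a", "x86", "x86_64", "mips"}
-- _DENSITY = {"ldpi", "mdpi", "hdpi", "xhdpi", "xxhdpi", "xxxhdpi", "nodpi", "tvdpi"}
-- _CATS = ("other", "locale", "density", "abi")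
--
--
-- def _rank(token):
--     if token in _ABI:
--         return 3
--     if token in _DENSITY:
--         return 2
--     if (token.isalpha() and len(token) <= 3) or "-r" in token:
--         return 1
--     return 0
--
--
-- def _infer_config_category(split_name):
--     label = split_name.split(".", 1)[-1].lower()
--     tokens = {token.replace("-", "_") for token in label.split(".")}
--     best = 0
--     for token in tokens:
--         best = max(best, _rank(token))
--     return _CATS[best]
-- ===== Notes on version B (the rewrite author's own statement) =====
-- stated objective: alternative
-- what changed: Replaces A's four sequential per-category scans over the token set (two set intersections plus two any() passes) with a single pass that ranks each token once (abi=3, density=2, locale=1, other=0) and keeps the running maximum, indexing the category name by the best rank.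
import Mathlib
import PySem

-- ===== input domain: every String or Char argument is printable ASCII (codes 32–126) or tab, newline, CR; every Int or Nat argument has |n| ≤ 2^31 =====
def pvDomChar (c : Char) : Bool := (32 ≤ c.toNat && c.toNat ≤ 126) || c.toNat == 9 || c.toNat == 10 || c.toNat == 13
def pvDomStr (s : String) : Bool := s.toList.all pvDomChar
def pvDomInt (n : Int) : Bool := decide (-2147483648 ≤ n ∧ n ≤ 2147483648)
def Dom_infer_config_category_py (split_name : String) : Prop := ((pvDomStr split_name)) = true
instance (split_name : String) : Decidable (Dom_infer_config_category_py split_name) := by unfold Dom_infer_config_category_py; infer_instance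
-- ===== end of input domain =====

-- B replaces A's four sequential per-category scans of the token set with a single pass
-- that ranks each token once and keeps the running maximum (objective: alternative).

-- ===== PORT A =====
def infer_config_category_py (split_name : String) : Option String :=
  let label := PySem.Str.lower (PySem.List.pyGetD ((PySem.Str.splitMax? split_name "." 1).getD []) (-1) "")
  let tokens : PySem.Set String :=
    PySem.Set.ofList (((PySem.Str.split? label ".").getD []).map (fun t => PySem.Str.replace t "-" "_"))
  let abi_tokens : PySem.Set String :=
    PySem.Set.ofList ["armeabi", "armeabi_v7a", "arm64_v8a", "x86", "x86_64", "mips"]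
  let density_tokens : PySem.Set String :=
    PySem.Set.ofList ["ldpi", "mdpi", "hdpi", "xhdpi", "xxhdpi", "xxxhdpi", "nodpi", "tvdpi"]
  if PySem.Set.inter tokens abi_tokens ≠ [] then some "abi"
  else if PySem.Set.inter tokens density_tokens ≠ [] then some "density"
  else if tokens.any (fun t => PySem.Str.strIsalpha t && decide (PySem.Str.len t ≤ 3)) then some "locale"
  else if tokens.any (fun t => PySem.Str.isIn "-r" t) then some "locale"
  else some "other"

-- ===== PORT B =====
def pvRank (token : String) : Nat :=
  if ["armeabi", "armeabi_v7a", "arm64_v8a", "x86", "x86_64", "mips"].contains token then 3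
  else if ["ldpi", "mdpi", "hdpi", "xhdpi", "xxhdpi", "xxxhdpi", "nodpi", "tvdpi"].contains token then 2
  else if (PySem.Str.strIsalpha token && decide (PySem.Str.len token ≤ 3)) || PySem.Str.isIn "-r" token then 1
  else 0

def infer_config_category_py_alt (split_name : String) : Option String :=
  let label := PySem.Str.lower (PySem.List.pyGetD ((PySem.Str.splitMax? split_name "." 1).getD []) (-1) "")
  let tokens : PySem.Set String :=
    PySem.Set.ofList (((PySem.Str.split? label ".").getD []).map (fun t => PySem.Str.replace t "-" "_"))
  let best := tokens.foldl (fun b t => max b (pvRank t)) 0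
  some (PySem.List.pyGetD ["other", "locale", "density", "abi"] (best : Int) "other")

-- ===== PRECONDITION & SPEC =====
def Spec_infer_config_category_py (split_name : String) (out : Option String) : Prop := out = infer_config_category_py_alt split_name
instance (split_name : String) (out : Option String) : Decidable (Spec_infer_config_category_py split_name out) := by unfold Spec_infer_config_category_py; infer_instance

-- ===== CLAIM (what is proved, stated in full; the proofs are below) =====
def Claim_equal_infer_config_category_py : Prop := ∀ (split_name : String), Dom_infer_config_category_py split_name → Spec_infer_config_category_py split_name (infer_config_category_py split_name)

-- ===== LEMMAS AND PROOFS =====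

-- abbreviations for the three token tests, used only in the proofs
def pvInAbi (t : String) : Bool := ["armeabi", "armeabi_v7a", "arm64_v8a", "x86", "x86_64", "mips"].contains t
def pvInDen (t : String) : Bool := ["ldpi", "mdpi", "hdpi", "xhdpi", "xxhdpi", "xxxhdpi", "nodpi", "tvdpi"].contains t
def pvLoc (t : String) : Bool := (PySem.Str.strIsalpha t && decide (PySem.Str.len t ≤ 3)) || PySem.Str.isIn "-r" t

def pvBest (L : List String) : Nat :=
  if L.any pvInAbi then 3 else if L.any pvInDen then 2 else if L.any pvLoc then 1 else 0

lemma pvRank_eq (t : String) :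
    pvRank t = if pvInAbi t then 3 else if pvInDen t then 2 else if pvLoc t then 1 else 0 := by
  simp [pvRank, pvInAbi, pvInDen, pvLoc]

lemma pvBest_cons (t : String) (L : List String) :
    pvBest (t :: L) = max (pvRank t) (pvBest L) := by
  simp only [pvBest, pvRank_eq, List.any_cons, Bool.or_eq_true]
  by_cases hA : pvInAbi t = true <;> by_cases hD : pvInDen t = true <;>
    by_cases hL : pvLoc t = true <;>
    simp only [hA, hD, hL, Bool.false_eq_true, if_true, if_false,
      true_or, false_or] <;> split_ifs <;> omega

lemma pvFoldl_best (L : List String) (b : Nat) :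
    L.foldl (fun b t => max b (pvRank t)) b = max b (pvBest L) := by
  induction L generalizing b with
  | nil => simp [pvBest]
  | cons t L ih =>
    simp only [List.foldl_cons, ih, pvBest_cons]
    omega

lemma pvInter_ne_nil_iff (L : List String) (S : PySem.Set String) :
    PySem.Set.inter L S ≠ [] ↔ L.any (fun t => S.contains t) = true := by
  constructor
  · intro h
    rcases List.exists_mem_of_ne_nil _ h with ⟨x, hx⟩
    unfold PySem.Set.inter at hx
    rw [List.mem_filter] at hx
    exact List.any_eq_true.mpr ⟨x, hx.1, hx.2⟩
  · intro h hnil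
    rcases List.any_eq_true.mp h with ⟨x, hxL, hxS⟩
    have : x ∈ PySem.Set.inter L S := by
      unfold PySem.Set.inter
      exact List.mem_filter.mpr ⟨hxL, hxS⟩
    simp [hnil] at this

lemma pvContains_abi (t : String) :
    ((PySem.Set.ofList ["armeabi", "armeabi_v7a", "arm64_v8a", "x86", "x86_64", "mips"]
      : PySem.Set String)).contains t = pvInAbi t := by
  have h : (PySem.Set.ofList ["armeabi", "armeabi_v7a", "arm64_v8a", "x86", "x86_64", "mips"]
      : PySem.Set String) = ["armeabi", "armeabi_v7a", "arm64_v8a", "x86", "x86_64", "mips"] := by decide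
  rw [h]; rfl

lemma pvContains_den (t : String) :
    ((PySem.Set.ofList ["ldpi", "mdpi", "hdpi", "xhdpi", "xxhdpi", "xxxhdpi", "nodpi", "tvdpi"]
      : PySem.Set String)).contains t = pvInDen t := by
  have h : (PySem.Set.ofList ["ldpi", "mdpi", "hdpi", "xhdpi", "xxhdpi", "xxxhdpi", "nodpi", "tvdpi"]
      : PySem.Set String) = ["ldpi", "mdpi", "hdpi", "xhdpi", "xxhdpi", "xxxhdpi", "nodpi", "tvdpi"] := by decide
  rw [h]; rfl

-- the post-tokenisation halves of the two ports agree on ANY token list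
lemma pvKey (L : List String) :
    (if PySem.Set.inter L (PySem.Set.ofList ["armeabi", "armeabi_v7a", "arm64_v8a", "x86", "x86_64", "mips"]) ≠ ([] : List String) then some "abi"
     else if PySem.Set.inter L (PySem.Set.ofList ["ldpi", "mdpi", "hdpi", "xhdpi", "xxhdpi", "xxxhdpi", "nodpi", "tvdpi"]) ≠ ([] : List String) then some "density"
     else if L.any (fun t => PySem.Str.strIsalpha t && decide (PySem.Str.len t ≤ 3)) then some "locale"
     else if L.any (fun t => PySem.Str.isIn "-r" t) then some "locale"
     else some "other")
    = some (PySem.List.pyGetD ["other", "locale", "density", "abi"]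
        ((L.foldl (fun b t => max b (pvRank t)) 0 : Nat) : Int) "other") := by
  rw [pvFoldl_best, PySem.List.pyGetD_natCast]
  simp only [pvInter_ne_nil_iff, pvContains_abi, pvContains_den, Nat.zero_max]
  have hloc : (L.any (fun t => PySem.Str.strIsalpha t && decide (PySem.Str.len t ≤ 3)) = true)
      ∨ (L.any (fun t => PySem.Str.isIn "-r" t) = true) ↔ L.any pvLoc = true := by
    simp only [List.any_eq_true, pvLoc, Bool.or_eq_true]
    constructor
    · rintro (⟨x, hx, h⟩ | ⟨x, hx, h⟩)
      · exact ⟨x, hx, Or.inl h⟩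
      · exact ⟨x, hx, Or.inr h⟩
    · rintro ⟨x, hx, h | h⟩
      · exact Or.inl ⟨x, hx, h⟩
      · exact Or.inr ⟨x, hx, h⟩
  by_cases hA : L.any pvInAbi = true
  · have hb : pvBest L = 3 := by simp [pvBest, hA]
    rw [if_pos hA, hb]; rfl
  · have hA' : ¬ (L.any fun t => pvInAbi t) = true := hA
    rw [if_neg hA']
    by_cases hD : L.any pvInDen = true
    · have hb : pvBest L = 2 := by simp [pvBest, hA, hD]
      rw [if_pos hD, hb]; rfl
    · have hD' : ¬ (L.any fun t => pvInDen t) = true := hD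
      rw [if_neg hD']
      by_cases hL : L.any pvLoc = true
      · have hb : pvBest L = 1 := by simp [pvBest, hA, hD, hL]
        by_cases h1 : (L.any fun t => PySem.Str.strIsalpha t && decide (PySem.Str.len t ≤ 3)) = true
        · rw [if_pos h1, hb]; rfl
        · rcases hloc.mpr hL with h | h2
          · exact absurd h h1
          · rw [if_neg h1, if_pos h2, hb]; rfl
      · have hb : pvBest L = 0 := by simp [pvBest, hA, hD, hL]
        have h1 : ¬ (L.any fun t => PySem.Str.strIsalpha t && decide (PySem.Str.len t ≤ 3)) = true :=
          fun h => hL (hloc.mp (Or.inl h))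
        have h2 : ¬ (L.any fun t => PySem.Str.isIn "-r" t) = true :=
          fun h => hL (hloc.mp (Or.inr h))
        rw [if_neg h1, if_neg h2, hb]; rfl

-- ===== VERDICT (by name: the statement is the Claim_ definition above) =====
theorem infer_config_category_py_spec : Claim_equal_infer_config_category_py := by
  intro s _
  unfold Spec_infer_config_category_py infer_config_category_py infer_config_category_py_alt
  exact pvKey _
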